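-- pv_equiv track=rewrite | github.com/estianp/TinyPedalBroadcast | tinypedal/ui/broadcast_view.py | _calc_class_positions
-- ===== SOURCE A (Python) =====
-- def _calc_class_positions(driver_list):
--     """Calculate position in class for each driver
--
--     Args:
--         driver_list: list of (place, class_name, name, index, rel_gap).
--
--     Returns:
--         dict mapping driver index to position in class.
--     """
--     # Group by class, sorted by overall position within each class
--     classes = {}
--     for place, class_name, _name, driver_index, *_ in driver_list:
--         classes.setdefault(class_name, []).append((place, driver_index))
--
--     class_positions = {}
--     for entries in classes.values():
--         entries.sort()  # sort by overall place
--         for pos, (_, driver_index) in enumerate(entries, 1):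
--             class_positions[driver_index] = pos
--     return class_positions
-- ===== SOURCE B (Python) =====
-- def _calc_class_positions(driver_list):
--     """Calculate position in class for each driver.
--
--     One global sort plus running per-class counters, instead of grouping
--     into per-class buckets and sorting each bucket.
--     """
--     order = {}  # class name -> rank by first appearance
--     rows = []
--     for place, class_name, _name, driver_index, *_ in driver_list:
--         rank = order.setdefault(class_name, len(order))
--         rows.append((rank, place, driver_index))
--     rows.sort()
--     counts = {}
--     class_positions = {}
--     for rank, _place, driver_index in rows:
--         pos = counts.get(rank, 0) + 1
--         counts[rank] = pos
--         class_positions[driver_index] = pos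
--     return class_positions
-- ===== Notes on version B (the rewrite author's own statement) =====
-- stated objective: alternative
-- what changed: Replaces A's group-by-class-then-sort-each-bucket with one decoration pass (first-appearance class rank), a single global sort of (rank, place, index) triples, and one pass threading per-class running counters.
import Mathlib
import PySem

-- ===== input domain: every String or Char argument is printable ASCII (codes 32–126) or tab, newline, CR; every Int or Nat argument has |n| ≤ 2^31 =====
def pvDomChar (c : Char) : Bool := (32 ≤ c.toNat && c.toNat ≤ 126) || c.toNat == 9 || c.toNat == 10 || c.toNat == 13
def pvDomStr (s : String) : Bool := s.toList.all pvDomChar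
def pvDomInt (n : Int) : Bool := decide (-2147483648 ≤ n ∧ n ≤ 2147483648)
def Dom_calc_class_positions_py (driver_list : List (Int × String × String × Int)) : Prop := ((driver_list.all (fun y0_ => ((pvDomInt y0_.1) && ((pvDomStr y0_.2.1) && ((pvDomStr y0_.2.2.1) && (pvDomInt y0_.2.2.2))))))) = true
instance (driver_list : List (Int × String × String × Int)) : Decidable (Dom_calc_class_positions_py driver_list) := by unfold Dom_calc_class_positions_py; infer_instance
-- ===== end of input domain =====

-- B replaces A's group-by-class-then-sort-each-bucket with a decorate pass (first-appearance
-- class rank), ONE global sort of (rank, place, index) triples, and one pass threading running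
-- per-class counters; the two are proved to return the same association list on every input.

-- ===== PORT A =====
-- Python tuple comparison is lexicographic: entries.sort() on (place, index) pairs is
-- PySem.List.sorted with the lexicographic key 'toLex' (exact).
def calc_class_positions_py (driver_list : List (Int × String × String × Int)) : List (Int × Int) :=
  let classes : PySem.Dict String (List (Int × Int)) :=
    driver_list.foldl
      (fun d r => d.modify r.2.1 [] (fun l => l ++ [(r.1, r.2.2.2)])) PySem.Dict.empty
  let class_positions : PySem.Dict Int Int :=
    classes.values.foldl
      (fun d entries =>
        (PySem.List.enumerate (PySem.List.sorted entries (fun e => toLex e) false) 1).foldl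
          (fun d q => d.insert q.2.2 q.1) d)
      PySem.Dict.empty
  class_positions.items

-- ===== PORT B =====
-- Python tuple comparison is lexicographic: rows.sort() on (rank, place, index) triples is
-- PySem.List.sorted with the nested lexicographic key (exact).
def calc_class_positions_py_alt (driver_list : List (Int × String × String × Int)) : List (Int × Int) :=
  let st : PySem.Dict String Int × List (Int × Int × Int) :=
    driver_list.foldl
      (fun st r =>
        let rank : Int := st.1.getD r.2.1 (st.1.size : Int)   -- order.setdefault(cn, len(order))
        (st.1.setdefault r.2.1 (st.1.size : Int), st.2 ++ [(rank, r.1, r.2.2.2)]))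
      (PySem.Dict.empty, [])
  let rows := PySem.List.sorted st.2 (fun t => toLex (t.1, toLex (t.2.1, t.2.2))) false
  let fin : PySem.Dict Int Int × PySem.Dict Int Int :=
    rows.foldl
      (fun st t =>
        let pos : Int := st.1.getD t.1 0 + 1
        (st.1.insert t.1 pos, st.2.insert t.2.2 pos))
      (PySem.Dict.empty, PySem.Dict.empty)
  fin.2.items

-- ===== PRECONDITION & SPEC =====
def Spec_calc_class_positions_py (driver_list : List (Int × String × String × Int)) (out : List (Int × Int)) : Prop := out = calc_class_positions_py_alt driver_list
instance (driver_list : List (Int × String × String × Int)) (out : List (Int × Int)) : Decidable (Spec_calc_class_positions_py driver_list out) := by unfold Spec_calc_class_positions_py; infer_instance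

-- ===== CLAIM (what is proved, stated in full; the proofs are below) =====
def Claim_equal_calc_class_positions_py : Prop := ∀ (driver_list : List (Int × String × String × Int)), Dom_calc_class_positions_py driver_list → Spec_calc_class_positions_py driver_list (calc_class_positions_py driver_list)

-- ===== LEMMAS AND PROOFS =====

-- abbreviations used only by the proofs
def pvKey (r : Int × String × String × Int) : String := r.2.1
def pvVal (r : Int × String × String × Int) : Int × Int := (r.1, r.2.2.2)
def pvCls (L : List (Int × String × String × Int)) : List String := PySem.Set.ofList (L.map pvKey)
def pvBucket (L : List (Int × String × String × Int)) (c : String) : List (Int × Int) :=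
  (L.filter (fun r => pvKey r == c)).map pvVal
def pvIdx (L : List (Int × String × String × Int)) (c : String) : Int := ((pvCls L).idxOf c : Int)
def pvDec (L : List (Int × String × String × Int)) (r : Int × String × String × Int) : Int × Int × Int :=
  (pvIdx L (pvKey r), r.1, r.2.2.2)
def pvLexKey (t : Int × Int × Int) : Int ×ₗ (Int ×ₗ Int) := toLex (t.1, toLex (t.2.1, t.2.2))
-- A's per-bucket inner loop
def pvInner (d : PySem.Dict Int Int) (entries : List (Int × Int)) : PySem.Dict Int Int :=
  (PySem.List.enumerate (PySem.List.sorted entries (fun e => toLex e) false) 1).foldl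
    (fun d q => d.insert q.2.2 q.1) d
-- B's final-loop step
def pvStep (st : PySem.Dict Int Int × PySem.Dict Int Int) (t : Int × Int × Int) :
    PySem.Dict Int Int × PySem.Dict Int Int :=
  (st.1.insert t.1 (st.1.getD t.1 0 + 1), st.2.insert t.2.2 (st.1.getD t.1 0 + 1))
-- the canonical form of B's sorted row list: A's sorted buckets, decorated with their rank
def pvCanon (L : List (Int × String × String × Int)) : List (Int × Int × Int) :=
  (pvCls L).flatMap
    (fun c => (PySem.List.sorted (pvBucket L c) (fun e => toLex e) false).map
      (fun e => (pvIdx L c, e.1, e.2)))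

lemma pvA_values (L : List (Int × String × String × Int)) :
    (L.foldl (fun d r => d.modify r.2.1 [] (fun l => l ++ [(r.1, r.2.2.2)]))
      (PySem.Dict.empty : PySem.Dict String (List (Int × Int)))).values
    = (pvCls L).map (pvBucket L) := by
  have hkeys : (L.foldl (fun d r => d.modify r.2.1 [] (fun l => l ++ [(r.1, r.2.2.2)]))
      (PySem.Dict.empty : PySem.Dict String (List (Int × Int)))).keys = pvCls L := by
    rw [PySem.Dict.keys_foldl_modify_key L (fun r => r.2.1) [] (fun _ r l => l ++ [(r.1, r.2.2.2)])]
    rfl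
  have hnd : (L.foldl (fun d r => d.modify r.2.1 [] (fun l => l ++ [(r.1, r.2.2.2)]))
      (PySem.Dict.empty : PySem.Dict String (List (Int × Int)))).keys.Nodup := by
    exact PySem.Dict.nodup_keys_foldl_modify_key L (fun r => r.2.1) []
      (fun _ r l => l ++ [(r.1, r.2.2.2)]) _ (by simp [PySem.Dict.keys_empty])
  rw [PySem.Dict.values_eq_map_keys _ hnd [], hkeys]
  apply List.map_congr_left
  intro c _
  have hfold : (L.foldl (fun d r => d.modify r.2.1 [] (fun l => l ++ [(r.1, r.2.2.2)]))
      (PySem.Dict.empty : PySem.Dict String (List (Int × Int))))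
      = ((L.map (fun r => (pvKey r, pvVal r))).foldl
          (fun d p => d.modify p.1 [] (fun l => l ++ [p.2])) PySem.Dict.empty) := by
    rw [List.foldl_map]
    rfl
  rw [hfold, PySem.Dict.getD_foldl_modify_append]
  simp [PySem.Dict.getD_empty, List.filter_map, pvBucket, pvKey, pvVal, Function.comp_def]


lemma pvCls_append (p : List (Int × String × String × Int)) (r : Int × String × String × Int) :
    pvCls (p ++ [r]) = PySem.Set.add (pvCls p) (pvKey r) := by
  unfold pvCls
  rw [List.map_append]
  simp only [List.map_cons, List.map_nil]
  exact PySem.Set.ofList_append_singleton _ _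


lemma pvIdx_mono (p : List (Int × String × String × Int)) (r : Int × String × String × Int)
    (c : String) (hc : c ∈ p.map pvKey) : pvIdx (p ++ [r]) c = pvIdx p c := by
  unfold pvIdx
  rw [pvCls_append]
  by_cases h : pvKey r ∈ pvCls p
  · rw [PySem.Set.add_of_mem h]
  · rw [PySem.Set.add_of_not_mem h]
    unfold pvCls
    rw [List.idxOf_append]
    simp [(PySem.Set.mem_ofList _ _).mpr hc]


lemma pvB_inv (L : List (Int × String × String × Int)) :
    (L.foldl
      (fun (st : PySem.Dict String Int × List (Int × Int × Int)) r =>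
        (st.1.setdefault r.2.1 (st.1.size : Int),
         st.2 ++ [(st.1.getD r.2.1 (st.1.size : Int), r.1, r.2.2.2)]))
      (PySem.Dict.empty, [])).1.keys = pvCls L
    ∧ (∀ c ∈ pvCls L,
        (L.foldl
          (fun (st : PySem.Dict String Int × List (Int × Int × Int)) r =>
            (st.1.setdefault r.2.1 (st.1.size : Int),
             st.2 ++ [(st.1.getD r.2.1 (st.1.size : Int), r.1, r.2.2.2)]))
          (PySem.Dict.empty, [])).1.get? c = some (pvIdx L c))
    ∧ (L.foldl
        (fun (st : PySem.Dict String Int × List (Int × Int × Int)) r =>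
          (st.1.setdefault r.2.1 (st.1.size : Int),
           st.2 ++ [(st.1.getD r.2.1 (st.1.size : Int), r.1, r.2.2.2)]))
        (PySem.Dict.empty, [])).2 = L.map (pvDec L) := by
  induction L using List.reverseRecOn with
  | nil => refine ⟨rfl, ?_, rfl⟩; intro c hc; simp [pvCls, PySem.Set.ofList] at hc
  | append_singleton p r ih =>
    obtain ⟨hk, hg, hrows⟩ := ih
    rw [List.foldl_append]

    set F := p.foldl
      (fun (st : PySem.Dict String Int × List (Int × Int × Int)) r =>
        (st.1.setdefault r.2.1 (st.1.size : Int),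
         st.2 ++ [(st.1.getD r.2.1 (st.1.size : Int), r.1, r.2.2.2)]))
      (PySem.Dict.empty, []) with hF
    rw [show (List.foldl (fun (st : PySem.Dict String Int × List (Int × Int × Int)) r =>
          (st.1.setdefault r.2.1 (st.1.size : Int),
           st.2 ++ [(st.1.getD r.2.1 (st.1.size : Int), r.1, r.2.2.2)])) F [r])
        = (F.1.setdefault r.2.1 (F.1.size : Int),
           F.2 ++ [(F.1.getD r.2.1 (F.1.size : Int), r.1, r.2.2.2)]) from rfl]
    dsimp only
    have hsize : (F.1.size : Int) = ((pvCls p).length : Int) := by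
      have : F.1.size = F.1.keys.length := by
        simp [PySem.Dict.size, PySem.Dict.keys]
      rw [this, hk]
    have hrows' : F.2 = p.map (pvDec (p ++ [r])) := by
      rw [hrows]; apply List.map_congr_left; intro x hx
      unfold pvDec
      rw [pvIdx_mono p r (pvKey x) (List.mem_map_of_mem hx)]
    by_cases hmem : pvKey r ∈ pvCls p
    · have hcls : pvCls (p ++ [r]) = pvCls p := by
        rw [pvCls_append, PySem.Set.add_of_mem hmem]
      have hcont : F.1.contains r.2.1 = true := by
        rw [PySem.Dict.contains_iff_mem_keys, hk]; exact hmem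
      have hrank : F.1.getD r.2.1 (F.1.size : Int) = pvIdx (p ++ [r]) r.2.1 := by
        rw [PySem.Dict.getD_eq_get?_getD,
          show F.1.get? r.2.1 = some (pvIdx p (pvKey r)) from hg (pvKey r) hmem]
        simp only [Option.getD_some]
        exact (pvIdx_mono p r (pvKey r) ((PySem.Set.mem_ofList _ _).mp hmem)).symm
      refine ⟨?_, ?_, ?_⟩
      · rw [PySem.Dict.setdefault_of_contains _ _ hcont, hk, hcls]
      · intro c hc
        rw [PySem.Dict.setdefault_of_contains _ _ hcont]
        have hcp : c ∈ pvCls p := by rwa [hcls] at hc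
        rw [hg c hcp, pvIdx_mono p r c ((PySem.Set.mem_ofList _ _).mp hcp)]
      · rw [List.map_append, ← hrows']
        congr 1
        simp only [List.map_cons, List.map_nil]
        rw [hrank]
        rfl
    · have hcls : pvCls (p ++ [r]) = pvCls p ++ [pvKey r] := by
        rw [pvCls_append, PySem.Set.add_of_not_mem hmem]
      have hcont : F.1.contains r.2.1 = false := by
        rw [Bool.eq_false_iff]
        intro h
        exact hmem (by rwa [PySem.Dict.contains_iff_mem_keys, hk] at h)
      have hidxr : pvIdx (p ++ [r]) (pvKey r) = ((pvCls p).length : Int) := by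
        unfold pvIdx
        rw [hcls, List.idxOf_append]
        simp [hmem]
      have hrank : F.1.getD r.2.1 (F.1.size : Int) = pvIdx (p ++ [r]) r.2.1 := by
        rw [PySem.Dict.getD_of_not_contains _ _ hcont, hsize]
        exact hidxr.symm
      refine ⟨?_, ?_, ?_⟩
      · rw [PySem.Dict.setdefault_of_not_contains _ _ hcont,
            PySem.Dict.keys_insert_of_not_contains _ _ hcont, hk, hcls]
        rfl
      · intro c hc
        rw [PySem.Dict.setdefault_of_not_contains _ _ hcont, PySem.Dict.get?_insert]
        by_cases hce : c = r.2.1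
        · subst hce
          rw [if_pos rfl, hsize]
          exact congrArg some hidxr.symm
        · rw [if_neg hce]
          have hcp : c ∈ pvCls p := by
            rw [hcls] at hc
            rcases List.mem_append.mp hc with h | h
            · exact h
            · simp at h; exact absurd h hce
          rw [hg c hcp, pvIdx_mono p r c ((PySem.Set.mem_ofList _ _).mp hcp)]
      · rw [List.map_append, ← hrows']
        congr 1
        simp only [List.map_cons, List.map_nil]
        rw [hrank]
        rfl


lemma pvB_rows (L : List (Int × String × String × Int)) :
    (L.foldl
      (fun (st : PySem.Dict String Int × List (Int × Int × Int)) r =>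
        (st.1.setdefault r.2.1 (st.1.size : Int),
         st.2 ++ [(st.1.getD r.2.1 (st.1.size : Int), r.1, r.2.2.2)]))
      (PySem.Dict.empty, [])).2
    = L.map (pvDec L) := (pvB_inv L).2.2


lemma pvLexKey_inj : Function.Injective pvLexKey := by
  rintro ⟨a1, a2, a3⟩ ⟨b1, b2, b3⟩ h
  simpa [pvLexKey, Prod.ext_iff] using h


lemma pvFlatMap_congr {α β : Type} (l : List α) (f g : α → List β)
    (h : ∀ a ∈ l, f a = g a) : l.flatMap f = l.flatMap g := by
  induction l with
  | nil => rfl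
  | cons a t ih =>
    simp only [List.flatMap_cons]
    rw [h a (by simp), ih (fun b hb => h b (by simp [hb]))]


lemma pvPerm_flatMap {α β : Type} (l : List α) (f g : α → List β)
    (h : ∀ a ∈ l, (f a).Perm (g a)) : (l.flatMap f).Perm (l.flatMap g) := by
  induction l with
  | nil => simp
  | cons a t ih =>
    simp only [List.flatMap_cons]
    exact (h a (by simp)).append (ih (fun b hb => h b (by simp [hb])))


lemma pvPairwise_flatMap {α β : Type} (R : β → β → Prop) (f : α → List β) (l : List α)
    (h1 : ∀ a ∈ l, (f a).Pairwise R)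
    (h2 : l.Pairwise (fun a b => ∀ x ∈ f a, ∀ y ∈ f b, R x y)) :
    (l.flatMap f).Pairwise R := by
  induction l with
  | nil => simp
  | cons a t ih =>
    simp only [List.flatMap_cons]
    rw [List.pairwise_append]
    rcases List.pairwise_cons.mp h2 with ⟨hhead, htail⟩
    refine ⟨h1 a (by simp), ih (fun b hb => h1 b (by simp [hb])) htail, ?_⟩
    intro x hx y hy
    rcases List.mem_flatMap.mp hy with ⟨b, hb, hyb⟩
    exact hhead b hb x hx y hyb


lemma pvPerm_partition {α κ : Type} [BEq κ] [LawfulBEq κ] (key : α → κ) :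
    ∀ (cs : List κ) (xs : List α), cs.Nodup → (∀ x ∈ xs, key x ∈ cs) →
    (cs.flatMap (fun c => xs.filter (fun x => key x == c))).Perm xs := by
  intro cs
  induction cs with
  | nil =>
    intro xs _ hcov
    cases xs with
    | nil => simp
    | cons a t => exact absurd (hcov a (by simp)) (by simp)
  | cons c t ih =>
    intro xs hnd hcov
    simp only [List.flatMap_cons]
    have hcne : c ∉ t := (List.nodup_cons.mp hnd).1
    have hstep : ∀ c' ∈ t, xs.filter (fun x => key x == c')
        = (xs.filter (fun x => !(key x == c))).filter (fun x => key x == c') := by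
      intro c' hc'
      rw [List.filter_filter]
      apply List.filter_congr
      intro x _
      by_cases h : key x = c'
      · have hne : c' ≠ c := fun e => hcne (e ▸ hc')
        simpa [h] using hne
      · simp [h]
    have hcov' : ∀ x ∈ xs.filter (fun x => !(key x == c)), key x ∈ t := by
      intro x hx
      rcases List.mem_filter.mp hx with ⟨hxs, hne⟩
      rcases List.mem_cons.mp (hcov x hxs) with h | h
      · simp at hne; exact absurd h hne
      · exact h
    have hperm := ih (xs.filter (fun x => !(key x == c))) (List.nodup_cons.mp hnd).2 hcov'
    rw [pvFlatMap_congr t _ _ hstep]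
    exact (List.Perm.append_left _ hperm).trans (List.filter_append_perm _ xs)


lemma pvCls_pairwise (L : List (Int × String × String × Int)) :
    (pvCls L).Pairwise (fun a b => pvIdx L a < pvIdx L b) := by
  have hnd : (pvCls L).Nodup := PySem.Set.nodup_ofList _
  rw [List.pairwise_iff_getElem]
  intro i j hi hj hij
  unfold pvIdx
  have h1 := List.Nodup.idxOf_getElem hnd i hi
  have h2 := List.Nodup.idxOf_getElem hnd j hj
  rw [h1, h2]
  exact_mod_cast hij


lemma pvSort_canon (L : List (Int × String × String × Int)) :
    PySem.List.sorted (L.map (pvDec L)) pvLexKey false = pvCanon L := by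
  apply PySem.List.eq_of_perm_of_pairwise_le_of_injective pvLexKey pvLexKey_inj
  · -- permutation
    refine (PySem.List.sorted_perm _ _ _).trans ?_
    have s1 : (pvCanon L).Perm
        ((pvCls L).flatMap (fun c => (pvBucket L c).map (fun e => (pvIdx L c, e.1, e.2)))) := by
      apply pvPerm_flatMap
      intro c _
      exact List.Perm.map _ (PySem.List.sorted_perm _ _ _)
    have s2 : (pvCls L).flatMap (fun c => (pvBucket L c).map (fun e => (pvIdx L c, e.1, e.2)))
        = (pvCls L).flatMap (fun c => (L.filter (fun r => pvKey r == c)).map (pvDec L)) := by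
      apply pvFlatMap_congr
      intro c _
      unfold pvBucket
      rw [List.map_map]
      apply List.map_congr_left
      intro r hr
      have : pvKey r = c := by
        have := (List.mem_filter.mp hr).2
        simpa using this
      simp [pvDec, pvVal, Function.comp, this]
    have s3 : (pvCls L).flatMap (fun c => (L.filter (fun r => pvKey r == c)).map (pvDec L))
        = ((pvCls L).flatMap (fun c => L.filter (fun r => pvKey r == c))).map (pvDec L) := by
      rw [List.map_flatMap]
    have s4 : (((pvCls L).flatMap (fun c => L.filter (fun r => pvKey r == c))).map (pvDec L)).Perm
        (L.map (pvDec L)) := by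
      apply List.Perm.map
      apply pvPerm_partition pvKey (pvCls L) L (PySem.Set.nodup_ofList _)
      intro x hx
      exact (PySem.Set.mem_ofList _ _).mpr (List.mem_map_of_mem hx)
    have s13 : (pvCanon L).Perm
        (((pvCls L).flatMap (fun c => L.filter (fun r => pvKey r == c))).map (pvDec L)) := by
      rw [← s3, ← s2]; exact s1
    exact (s13.trans s4).symm
  · exact PySem.List.sorted_pairwise _ _
  · -- canon is pairwise ≤ under the lexicographic key
    apply pvPairwise_flatMap
    · intro c _
      rw [List.pairwise_map]
      have hp := PySem.List.sorted_pairwise (pvBucket L c) (fun e => toLex e)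
      apply hp.imp
      intro e e' h
      unfold pvLexKey
      rw [Prod.Lex.toLex_le_toLex]
      right
      refine ⟨rfl, ?_⟩
      simpa using h
    · have := (pvCls_pairwise L)
      apply this.imp_of_mem
      intro a b _ _ hab x hx y hy
      rcases List.mem_map.mp hx with ⟨e, _, rfl⟩
      rcases List.mem_map.mp hy with ⟨e', _, rfl⟩
      unfold pvLexKey
      rw [Prod.Lex.toLex_le_toLex]
      left
      exact hab


lemma pvInnerFold :
    ∀ (es : List (Int × Int)) (j : Int) (cnts cp : PySem.Dict Int Int) (n : Int),
      cnts.getD j 0 = n →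
      ((es.map (fun e => (j, e.1, e.2))).foldl pvStep (cnts, cp)).2
          = (PySem.List.enumerate es (n + 1)).foldl (fun d q => d.insert q.2.2 q.1) cp
        ∧ ∀ j' : Int, j' ≠ j →
          ((es.map (fun e => (j, e.1, e.2))).foldl pvStep (cnts, cp)).1.getD j' 0
            = cnts.getD j' 0 := by
  intro es
  induction es with
  | nil => intro j cnts cp n _; exact ⟨rfl, fun _ _ => rfl⟩
  | cons e es ih =>
    intro j cnts cp n hn
    simp only [List.map_cons, List.foldl_cons, PySem.List.enumerate_cons]
    have hstep : pvStep (cnts, cp) (j, e.1, e.2)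
        = (cnts.insert j (n + 1), cp.insert e.2 (n + 1)) := by
      rw [← hn]; rfl
    rw [hstep]
    have hn' : (cnts.insert j (n + 1)).getD j 0 = n + 1 := by
      rw [PySem.Dict.getD_insert_self]
    obtain ⟨h1, h2⟩ := ih j (cnts.insert j (n + 1)) (cp.insert e.2 (n + 1)) (n + 1) hn'
    refine ⟨?_, ?_⟩
    · rw [h1]
    · intro j' hj'
      rw [h2 j' hj', PySem.Dict.getD_insert_of_ne]
      exact hj'


lemma pvOuterFold (L : List (Int × String × String × Int)) :
    ∀ (cs : List String) (cnts cp : PySem.Dict Int Int),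
      (∀ c ∈ cs, cnts.getD (pvIdx L c) 0 = 0) →
      cs.Pairwise (fun a b => pvIdx L a ≠ pvIdx L b) →
      ((cs.flatMap
          (fun c => (PySem.List.sorted (pvBucket L c) (fun e => toLex e) false).map
            (fun e => (pvIdx L c, e.1, e.2)))).foldl pvStep (cnts, cp)).2
        = cs.foldl (fun d c => pvInner d (pvBucket L c)) cp := by
  intro cs
  induction cs with
  | nil => intro cnts cp _ _; rfl
  | cons c cs ih =>
    intro cnts cp hz hp
    simp only [List.flatMap_cons, List.foldl_append, List.foldl_cons]
    obtain ⟨hhead, htail⟩ := List.pairwise_cons.mp hp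
    obtain ⟨h1, h2⟩ := pvInnerFold
      (PySem.List.sorted (pvBucket L c) (fun e => toLex e) false)
      (pvIdx L c) cnts cp 0 (hz c (List.mem_cons_self))
    set res := ((PySem.List.sorted (pvBucket L c) (fun e => toLex e) false).map
      (fun e => (pvIdx L c, e.1, e.2))).foldl pvStep (cnts, cp) with hres
    have hcp : res.2 = pvInner cp (pvBucket L c) := by
      rw [h1]
      norm_num [pvInner]
    have hz' : ∀ c' ∈ cs, res.1.getD (pvIdx L c') 0 = 0 := by
      intro c' hc'
      rw [h2 (pvIdx L c') (Ne.symm (hhead c' hc'))]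
      exact hz c' (List.mem_cons_of_mem _ hc')
    rw [show res = (res.1, res.2) from rfl, hcp]
    exact ih res.1 (pvInner cp (pvBucket L c)) hz' htail


lemma pvFold_canon (L : List (Int × String × String × Int)) :
    ((pvCanon L).foldl pvStep (PySem.Dict.empty, PySem.Dict.empty)).2
    = ((pvCls L).map (pvBucket L)).foldl pvInner PySem.Dict.empty := by
  unfold pvCanon
  rw [List.foldl_map]
  apply pvOuterFold
  · intro c _
    rw [PySem.Dict.getD_empty]
  · exact (pvCls_pairwise L).imp (fun h => ne_of_lt h)

-- ===== VERDICT (by name: the statement is the Claim_ definition above) =====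
theorem calc_class_positions_py_spec : Claim_equal_calc_class_positions_py := by
  intro L _
  unfold Spec_calc_class_positions_py calc_class_positions_py calc_class_positions_py_alt
  simp only []
  rw [pvA_values L, pvB_rows L]
  rw [show (fun (t : Int × Int × Int) => toLex (t.1, toLex (t.2.1, t.2.2))) = pvLexKey from rfl]
  rw [pvSort_canon L]
  rw [show (fun (st : PySem.Dict Int Int × PySem.Dict Int Int) (t : Int × Int × Int) =>
        (st.1.insert t.1 (st.1.getD t.1 0 + 1), st.2.insert t.2.2 (st.1.getD t.1 0 + 1))) = pvStep from rfl]
  rw [pvFold_canon L]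
  rfl
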